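-- pv_equiv track=rewrite | github.com/DavidNinoGalvis/Estructura-De-Datos | tarea1.py | diferenciaListas
-- ===== SOURCE A (Python) =====
-- def diferenciaListas(array1,array2):
--     commonList = array1
--     deleted, i = [], 0
--     while i <= len(array1)-1:
--         if array1[i] in array2 and array1[i] not in deleted:
--             deleted.append(commonList.pop(i))
--         else:
--             i += 1
--     return commonList
-- ===== SOURCE B (Python) =====
-- def diferenciaListas(array1, array2):
--     pending = set(array2)
--     result = []
--     for x in array1:
--         if x in pending:
--             pending.discard(x)
--         else:
--             result.append(x)
--     return result
-- ===== Notes on version B (the rewrite author's own statement) =====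
-- stated objective: faster
-- what changed: Replaces the index-juggling while loop with repeated in-place list.pop and linear scans of array2 and deleted by a single left-to-right pass over array1 that appends kept elements, with an O(1)-membership set of still-pending array2 values that shrinks as first occurrences are dropped.
import Mathlib
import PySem

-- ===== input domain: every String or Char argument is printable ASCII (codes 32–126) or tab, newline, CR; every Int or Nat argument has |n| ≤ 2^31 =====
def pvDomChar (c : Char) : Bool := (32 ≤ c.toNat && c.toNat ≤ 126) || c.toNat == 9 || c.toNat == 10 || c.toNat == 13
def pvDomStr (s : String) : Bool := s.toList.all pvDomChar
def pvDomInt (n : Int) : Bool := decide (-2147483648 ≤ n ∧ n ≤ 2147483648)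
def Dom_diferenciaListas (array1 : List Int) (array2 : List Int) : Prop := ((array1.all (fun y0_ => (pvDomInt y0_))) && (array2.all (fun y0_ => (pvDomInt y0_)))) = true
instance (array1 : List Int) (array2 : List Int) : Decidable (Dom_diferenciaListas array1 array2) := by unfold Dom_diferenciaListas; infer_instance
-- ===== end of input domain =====

-- B replaces A's in-place pop/index while loop (linear scans of array2 and deleted) by one
-- pass over array1 with a shrinking set of pending array2 values (objective: faster).
-- Note: Python A mutates array1 in place (commonList IS array1); the equivalence proved
-- here is about the RETURN value only.

-- ===== PORT A =====
-- while loop of A: state = (commonList, deleted, i); pop(i) = eraseIdx i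
def diferenciaListasLoop (commonList : List Int) (array2 : List Int)
    (deleted : List Int) (i : Nat) : List Int :=
  if h : i < commonList.length then
    let x := commonList[i]
    if x ∈ array2 ∧ x ∉ deleted then
      diferenciaListasLoop (commonList.eraseIdx i) array2 (deleted ++ [x]) i
    else
      diferenciaListasLoop commonList array2 deleted (i + 1)
  else commonList
termination_by commonList.length - i
decreasing_by
  · simp [List.length_eraseIdx, h]; omega
  · omega

def diferenciaListas (array1 : List Int) (array2 : List Int) : List Int :=
  diferenciaListasLoop array1 array2 [] 0

-- ===== PORT B =====
-- for x in array1: if x in pending: pending.discard(x) else: result.append(x)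
def diferenciaListasAltGo (pending : PySem.Set Int) (result : List Int) : List Int → List Int
  | [] => result
  | x :: xs =>
    if x ∈ pending then diferenciaListasAltGo (PySem.Set.discard pending x) result xs
    else diferenciaListasAltGo pending (result ++ [x]) xs

def diferenciaListas_alt (array1 : List Int) (array2 : List Int) : List Int :=
  diferenciaListasAltGo (PySem.Set.ofList array2) [] array1

-- ===== PRECONDITION & SPEC =====
def Spec_diferenciaListas (array1 : List Int) (array2 : List Int) (out : List Int) : Prop := out = diferenciaListas_alt array1 array2
instance (array1 : List Int) (array2 : List Int) (out : List Int) : Decidable (Spec_diferenciaListas array1 array2 out) := by unfold Spec_diferenciaListas; infer_instance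

-- ===== CLAIM (what is proved, stated in full; the proofs are below) =====
def Claim_equal_diferenciaListas : Prop := ∀ (array1 : List Int) (array2 : List Int), Dom_diferenciaListas array1 array2 → Spec_diferenciaListas array1 array2 (diferenciaListas array1 array2)

-- ===== LEMMAS AND PROOFS =====

-- reference function: drop the first remaining occurrence of each value of array2 not yet deleted
def refDel (array2 deleted : List Int) : List Int → List Int
  | [] => []
  | x :: xs =>
    if x ∈ array2 ∧ x ∉ deleted then refDel array2 (deleted ++ [x]) xs
    else x :: refDel array2 deleted xs

lemma loop_eq_refDel (array2 : List Int) : ∀ (fuel : Nat) (cl deleted : List Int) (i : Nat),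
    cl.length - i ≤ fuel →
    diferenciaListasLoop cl array2 deleted i = cl.take i ++ refDel array2 deleted (cl.drop i) := by
  intro fuel
  induction fuel with
  | zero =>
    intro cl deleted i hle
    have hi : cl.length ≤ i := by omega
    rw [diferenciaListasLoop]
    simp [Nat.not_lt.mpr hi, List.drop_eq_nil_of_le hi, List.take_of_length_le hi, refDel]
  | succ n ih =>
    intro cl deleted i hle
    rw [diferenciaListasLoop]
    by_cases h : i < cl.length
    · simp only [h, dif_pos]
      have hdrop : cl.drop i = cl[i] :: cl.drop (i + 1) := List.drop_eq_getElem_cons h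
      by_cases hc : cl[i] ∈ array2 ∧ cl[i] ∉ deleted
      · simp only [hc]
        have hlen : (cl.eraseIdx i).length = cl.length - 1 := by
          simp [List.length_eraseIdx, h]
        rw [ih (cl.eraseIdx i) (deleted ++ [cl[i]]) i (by omega)]
        rw [hdrop]
        simp only [refDel, hc]
        have h1 : (cl.eraseIdx i).take i = cl.take i := by
          rw [List.eraseIdx_eq_take_drop_succ, List.take_append]
          simp [List.length_take, Nat.le_of_lt h]
        have h2 : (cl.eraseIdx i).drop i = cl.drop (i + 1) := by
          rw [List.eraseIdx_eq_take_drop_succ, List.drop_append]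
          simp [List.length_take, Nat.le_of_lt h]
        rw [h1, h2]
        simp
      · simp only [hc, if_neg, not_false_iff]
        rw [ih cl deleted (i + 1) (by omega)]
        rw [hdrop]
        simp only [refDel, hc, if_neg, not_false_iff]
        have h3 : cl.take (i + 1) = cl.take i ++ [cl[i]] := by
          rw [List.take_add_one, List.getElem?_eq_getElem h]; simp
        rw [h3, List.append_assoc]
        simp
    · simp only [h, dif_neg, not_false_iff]
      have hi : cl.length ≤ i := Nat.le_of_not_lt h
      simp [List.drop_eq_nil_of_le hi, List.take_of_length_le hi, refDel]

lemma altGo_eq_refDel (array2 : List Int) :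
    ∀ (xs : List Int) (pending : PySem.Set Int) (deleted result : List Int),
    (∀ y, y ∈ pending ↔ (y ∈ array2 ∧ y ∉ deleted)) →
    diferenciaListasAltGo pending result xs = result ++ refDel array2 deleted xs := by
  intro xs
  induction xs with
  | nil => intro pending deleted result _; simp [diferenciaListasAltGo, refDel]
  | cons x xs ih =>
    intro pending deleted result hmem
    simp only [diferenciaListasAltGo, refDel]
    by_cases hx : x ∈ pending
    · have hc : x ∈ array2 ∧ x ∉ deleted := (hmem x).mp hx
      simp only [hx, if_pos, hc]
      apply ih
      intro y
      rw [PySem.Set.mem_discard, hmem y]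
      simp only [List.mem_append, List.mem_singleton]
      constructor
      · rintro ⟨⟨h1, h2⟩, h3⟩; exact ⟨h1, by simp [h2, h3]⟩
      · rintro ⟨h1, h2⟩; push Not at h2; exact ⟨⟨h1, h2.1⟩, h2.2⟩
    · have hc : ¬ (x ∈ array2 ∧ x ∉ deleted) := fun h => hx ((hmem x).mpr h)
      simp only [hx, if_neg, not_false_iff, hc]
      rw [ih pending deleted (result ++ [x]) hmem]
      simp

-- ===== VERDICT (by name: the statement is the Claim_ definition above) =====
theorem diferenciaListas_spec : Claim_equal_diferenciaListas := by
  intro array1 array2 _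
  unfold Spec_diferenciaListas diferenciaListas diferenciaListas_alt
  rw [loop_eq_refDel array2 array1.length array1 [] 0 (by omega)]
  rw [altGo_eq_refDel array2 array1 (PySem.Set.ofList array2) [] []
    (by intro y; simp [PySem.Set.mem_ofList])]
  simp
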